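-- pv_equiv track=rewrite | github.com/Rebecavitoria45/TSP-implementacao | TSP.py | eh_valida_rota
-- ===== SOURCE A (Python) =====
-- def eh_valida_rota(rota):
--     if len(rota) == 14:
--         rota_sem_extremos = rota[1:-1]  # removendo a cidade 0 do início e fim
--         if 0 in rota_sem_extremos:
--          return False
--         for i in range(len(rota_sem_extremos)):
--             for j in range(i + 1, len(rota_sem_extremos)):
--                 if rota_sem_extremos[i] == rota_sem_extremos[j]:
--                     return False
--         return True
--     else:
--         return False
-- ===== SOURCE B (Python) =====
-- def eh_valida_rota(rota):
--     if len(rota) != 14: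
--         return False
--     middle = rota[1:-1]
--     return 0 not in middle and len(set(middle)) == len(middle)
-- ===== Notes on version B (the rewrite author's own statement) =====
-- stated objective: simpler
-- what changed: Replaced the nested O(n^2) index double loop that pairwise-compares middle cities with a single set-based uniqueness check len(set(middle)) == len(middle).
import Mathlib
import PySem

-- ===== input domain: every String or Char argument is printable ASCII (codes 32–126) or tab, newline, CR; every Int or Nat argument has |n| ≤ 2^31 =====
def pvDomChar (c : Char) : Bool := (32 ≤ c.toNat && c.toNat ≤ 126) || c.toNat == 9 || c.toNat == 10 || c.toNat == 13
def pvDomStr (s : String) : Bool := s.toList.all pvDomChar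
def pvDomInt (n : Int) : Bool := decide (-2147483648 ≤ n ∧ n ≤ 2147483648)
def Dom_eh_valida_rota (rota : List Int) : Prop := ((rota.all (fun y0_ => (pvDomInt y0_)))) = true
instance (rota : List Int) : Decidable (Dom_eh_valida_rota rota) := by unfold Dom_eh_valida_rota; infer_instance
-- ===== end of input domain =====

-- B replaces A's nested O(n^2) pairwise duplicate scan with a single set-based
-- uniqueness check (len(set(middle)) == len(middle)); objective: simpler.

-- ===== PORT A =====
def eh_valida_rota (rota : List Int) : Bool :=
  if rota.length == 14 then
    let mid := PySem.List.slice rota (some 1) (some (-1))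
    if mid.contains 0 then false
    else if (PySem.List.pyRange 0 mid.length 1).any (fun i =>
        (PySem.List.pyRange (i+1) mid.length 1).any (fun j =>
          PySem.List.pyGetD mid i 0 == PySem.List.pyGetD mid j 0))
      then false else true
  else false

-- ===== PORT B =====
def eh_valida_rota_alt (rota : List Int) : Bool :=
  if rota.length != 14 then false
  else
    let middle := PySem.List.slice rota (some 1) (some (-1))
    !middle.contains 0 && ((PySem.Set.ofList middle).length == middle.length)

-- ===== PRECONDITION & SPEC =====
def Spec_eh_valida_rota (rota : List Int) (out : Bool) : Prop := out = eh_valida_rota_alt rota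
instance (rota : List Int) (out : Bool) : Decidable (Spec_eh_valida_rota rota out) := by unfold Spec_eh_valida_rota; infer_instance

-- ===== CLAIM (what is proved, stated in full; the proofs are below) =====
def Claim_equal_eh_valida_rota : Prop := ∀ (rota : List Int), Dom_eh_valida_rota rota → Spec_eh_valida_rota rota (eh_valida_rota rota)

-- ===== LEMMAS AND PROOFS =====
-- key lemma 1: nested index loops detect a duplicate iff ¬ Nodup
theorem anyDup_eq (xs : List Int) :
    ((PySem.List.pyRange 0 xs.length 1).any (fun i =>
        (PySem.List.pyRange (i+1) xs.length 1).any (fun j =>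
          PySem.List.pyGetD xs i 0 == PySem.List.pyGetD xs j 0))) = !decide xs.Nodup := by
  rcases h : decide xs.Nodup with _ | _
  · have hnd : ¬ xs.Nodup := by simpa using h
    simp only [Bool.not_false]
    rw [List.any_eq_true]
    rw [List.nodup_iff_getElem?_ne_getElem?] at hnd
    push Not at hnd
    obtain ⟨i, j, hij, hj, heq⟩ := hnd
    refine ⟨(i : Int), ?_, ?_⟩
    · rw [PySem.List.mem_pyRange_one]; omega
    · rw [List.any_eq_true]
      refine ⟨(j : Int), ?_, ?_⟩
      · rw [PySem.List.mem_pyRange_one]; omega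
      · have hi : i < xs.length := by omega
        simp only [PySem.List.pyGetD_natCast, List.getD, beq_iff_eq]
        rw [heq]
  · have hnd : xs.Nodup := by simpa using h
    simp only [Bool.not_true]
    rw [List.any_eq_false]
    intro i hi
    rw [PySem.List.mem_pyRange_one] at hi
    rw [List.any_eq_true]
    push Not
    intro j hj
    rw [PySem.List.mem_pyRange_one] at hj
    rw [List.nodup_iff_getElem?_ne_getElem?] at hnd
    have := hnd i.toNat j.toNat (by omega) (by omega)
    simp only [ne_eq]
    rw [PySem.List.pyGetD_eq_getElem _ _ (by omega) (by omega),
        PySem.List.pyGetD_eq_getElem _ _ (by omega) (by omega)]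
    intro hc
    exact this (by rw [List.getElem?_eq_getElem (by omega), List.getElem?_eq_getElem (by omega)]; exact congrArg some (by simpa using hc))

theorem ofList_len_eq (xs : List Int) :
    ((PySem.Set.ofList xs).length == xs.length) = decide xs.Nodup := by
  rcases hnd : decide xs.Nodup with _ | _
  · have h : ¬ xs.Nodup := by simpa using hnd
    simp only [beq_eq_false_iff_ne, ne_eq]
    intro hlen
    apply h
    have h1 : (PySem.Set.ofList xs).Nodup := PySem.Set.nodup_ofList xs
    have h2 : (PySem.Set.ofList xs).toFinset = xs.toFinset := by
      ext a; simp [List.mem_toFinset, PySem.Set.mem_ofList]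
    have h3 : xs.toFinset.card = xs.length := by
      rw [← h2, List.toFinset_card_of_nodup h1, hlen]
    have := Multiset.toFinset_card_eq_card_iff_nodup (m := (xs : Multiset Int))
    simpa using this.mp (by simpa using h3)
  · have h : xs.Nodup := by simpa using hnd
    rw [PySem.Set.ofList_eq_self_of_nodup xs h]; simp

theorem eq_all (rota : List Int) : eh_valida_rota rota = eh_valida_rota_alt rota := by
  unfold eh_valida_rota eh_valida_rota_alt
  rcases h14 : (rota.length == 14) with _ | _
  · have : rota.length ≠ 14 := by simpa using h14
    simp [this]
  · simp only [h14, bne, Bool.not_true, if_true]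
    rcases hc : (PySem.List.slice rota (some 1) (some (-1))).contains 0 with _ | _
    · rw [anyDup_eq, ofList_len_eq]
      have hc' : (0 : Int) ∉ PySem.List.slice rota (some 1) (some (-1)) := by simpa using hc
      rcases hnd : decide (PySem.List.slice rota (some 1) (some (-1))).Nodup with _ | _ <;>
        simp_all
    · simp

-- ===== VERDICT (by name: the statement is the Claim_ definition above) =====
theorem eh_valida_rota_spec : Claim_equal_eh_valida_rota := by
  intro rota _
  unfold Spec_eh_valida_rota
  exact eq_all rota
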